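-- pv_equiv track=rewrite | github.com/raeez/chiral-bar-cobar | compute/lib/cy_cluster_mutation_engine.py | make_D_n_exchange_matrix
-- ===== SOURCE A (Python) =====
-- from typing import Dict, FrozenSet, List, Optional, Set, Tuple
--
-- def make_D_n_exchange_matrix(n: int) -> List[List[int]]:
--     """Exchange matrix for D_n Dynkin quiver (n >= 4).
--
--     Convention: vertices 1,...,n-2 form a chain, vertices n-1 and n
--     are both connected to vertex n-2 (the trivalent node).
--     Orientation: i -> i+1 for the chain, (n-2) -> (n-1), (n-2) -> n.
--     """
--     if n < 4:
--         raise ValueError(f"D_n requires n >= 4, got {n}")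
--     B = [[0] * n for _ in range(n)]
--     # Chain: 0 -> 1 -> ... -> n-3
--     for i in range(n - 3):
--         B[i][i + 1] = 1
--         B[i + 1][i] = -1
--     # Trivalent node n-3 connected to n-2 and n-1
--     # Using 0-indexed: node (n-3) -> (n-2) and (n-3) -> (n-1)
--     B[n - 3][n - 2] = 1
--     B[n - 2][n - 3] = -1
--     B[n - 3][n - 1] = 1
--     B[n - 1][n - 3] = -1
--     return B
-- ===== SOURCE B (Python) =====
-- def make_D_n_exchange_matrix(n):
--     """Row-wise functional construction: each row i is built independently
--     from the quiver's out-neighbour (succ) and in-neighbour (pred) sets."""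
--     if n < 4:
--         raise ValueError(f"D_n requires n >= 4, got {n}")
--
--     def succ(i):
--         if i < n - 3:
--             return [i + 1]
--         if i == n - 3:
--             return [n - 2, n - 1]
--         return []
--
--     def pred(i):
--         if i == n - 2 or i == n - 1:
--             return [n - 3]
--         if 1 <= i <= n - 3:
--             return [i - 1]
--         return []
--
--     def row(i):
--         r = [0] * n
--         for j in succ(i):
--             r[j] = 1
--         for j in pred(i):
--             r[j] = -1
--         return r
--
--     return [row(i) for i in range(n)]
-- ===== Notes on version B (the rewrite author's own statement) =====
-- stated objective: alternative
-- what changed: A allocates a zero matrix and mutates it globally (a chain loop of paired assignments plus four explicit trivalent-node assignments); B builds each row independently from closed-form out-neighbour (succ) and in-neighbour (pred) sets of that vertex, with no cross-row mutation.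
import Mathlib
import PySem

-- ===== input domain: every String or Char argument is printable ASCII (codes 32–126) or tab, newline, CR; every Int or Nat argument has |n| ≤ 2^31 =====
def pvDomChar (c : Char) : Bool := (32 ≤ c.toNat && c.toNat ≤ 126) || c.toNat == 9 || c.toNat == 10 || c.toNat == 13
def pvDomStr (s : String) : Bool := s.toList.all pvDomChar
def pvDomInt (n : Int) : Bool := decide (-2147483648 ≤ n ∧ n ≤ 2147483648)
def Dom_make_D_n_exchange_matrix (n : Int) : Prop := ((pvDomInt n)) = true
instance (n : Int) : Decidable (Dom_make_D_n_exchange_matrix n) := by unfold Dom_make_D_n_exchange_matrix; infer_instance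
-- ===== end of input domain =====

-- B replaces A's zero-matrix-then-mutate construction (a chain loop of paired
-- assignments plus four explicit trivalent-node assignments) by a closed-form
-- row-wise functional construction from succ/pred neighbour sets; objective: alternative (same cost).

-- ===== PORT A =====
-- B[i][j] = v  (Python list mutation; indices used by A are always in range)
def pvUpd (B : List (List Int)) (i j : Nat) (v : Int) : List (List Int) :=
  B.set i ((B.getD i []).set j v)

def make_D_n_exchange_matrix (n : Int) : List (List Int) :=
  if n < 4 then []  -- Python raises ValueError here; excluded by Pre_
  else
    let N := n.toNat
    let B0 := (List.range N).map (fun _ => List.replicate N (0 : Int))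
    let B1 := (List.range (N - 3)).foldl
      (fun B i => pvUpd (pvUpd B i (i + 1) 1) (i + 1) i (-1)) B0
    let B2 := pvUpd B1 (N - 3) (N - 2) 1
    let B3 := pvUpd B2 (N - 2) (N - 3) (-1)
    let B4 := pvUpd B3 (N - 3) (N - 1) 1
    pvUpd B4 (N - 1) (N - 3) (-1)

-- ===== PORT B =====
-- out-neighbours / in-neighbours of vertex i in the D_n quiver (N = n, exact for n ≥ 4)
def pvSucc (N i : Nat) : List Nat :=
  if i < N - 3 then [i + 1] else if i = N - 3 then [N - 2, N - 1] else []

def pvPred (N i : Nat) : List Nat :=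
  if i = N - 2 ∨ i = N - 1 then [N - 3]
  else if 1 ≤ i ∧ i ≤ N - 3 then [i - 1] else []

def pvRow (N i : Nat) : List Int :=
  let r := List.replicate N (0 : Int)
  let r := (pvSucc N i).foldl (fun r j => r.set j 1) r
  (pvPred N i).foldl (fun r j => r.set j (-1)) r

def make_D_n_exchange_matrix_alt (n : Int) : List (List Int) :=
  if n < 4 then []  -- Python raises ValueError here; excluded by Pre_
  else (List.range n.toNat).map (fun i => pvRow n.toNat i)

-- ===== PRECONDITION & SPEC =====
-- A raises ValueError for n < 4; exactly those inputs are excluded.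
def Pre_make_D_n_exchange_matrix (n : Int) : Prop := 4 ≤ n
instance (n : Int) : Decidable (Pre_make_D_n_exchange_matrix n) := by unfold Pre_make_D_n_exchange_matrix; infer_instance
def pvWitness_make_D_n_exchange_matrix : Int := 5

def Spec_make_D_n_exchange_matrix (n : Int) (out : List (List Int)) : Prop := out = make_D_n_exchange_matrix_alt n
instance (n : Int) (out : List (List Int)) : Decidable (Spec_make_D_n_exchange_matrix n out) := by unfold Spec_make_D_n_exchange_matrix; infer_instance

-- ===== CLAIM (what is proved, stated in full; the proofs are below) =====
def Claim_equal_make_D_n_exchange_matrix : Prop := ∀ (n : Int), Dom_make_D_n_exchange_matrix n → Pre_make_D_n_exchange_matrix n → Spec_make_D_n_exchange_matrix n (make_D_n_exchange_matrix n)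

-- ===== LEMMAS AND PROOFS =====

-- entry accessor used only by the proofs
def pvGet (B : List (List Int)) (p q : Nat) : Int := (B.getD p []).getD q 0

lemma pvGetD_set {α : Type} (B : List α) (i : Nat) (r d : α) (p : Nat) :
    ((B.set i r).getD p d) = if p = i ∧ i < B.length then r else B.getD p d := by
  simp [List.getD, List.getElem?_set]
  split_ifs <;> simp_all

lemma pvUpd_length (B : List (List Int)) (i j : Nat) (v : Int) :
    (pvUpd B i j v).length = B.length := by
  simp [pvUpd]

lemma pvUpd_row_length (B : List (List Int)) (i j : Nat) (v : Int) (p : Nat) :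
    ((pvUpd B i j v).getD p []).length = (B.getD p []).length := by
  rw [pvUpd, pvGetD_set]
  split_ifs with h
  · simp [h.1]
  · rfl

lemma pvGet_upd (B : List (List Int)) (i j : Nat) (v : Int) (p q : Nat)
    (hi : i < B.length) (hj : j < (B.getD i []).length) :
    pvGet (pvUpd B i j v) p q = if p = i ∧ q = j then v else pvGet B p q := by
  simp only [pvGet, pvUpd]
  rw [pvGetD_set]
  rcases eq_or_ne p i with rfl | hpi
  · rw [if_pos ⟨rfl, hi⟩, pvGetD_set]
    by_cases hqj : q = j
    · subst hqj
      rw [if_pos ⟨rfl, hj⟩, if_pos ⟨rfl, rfl⟩]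
    · rw [if_neg (fun h => hqj h.1), if_neg (fun h => hqj h.2)]
  · rw [if_neg (fun h => hpi h.1), if_neg (fun h => hpi h.1)]

-- the chain fold of A
def pvChain (N m : Nat) : List (List Int) :=
  (List.range m).foldl (fun B i => pvUpd (pvUpd B i (i + 1) 1) (i + 1) i (-1))
    ((List.range N).map (fun _ => List.replicate N (0 : Int)))

lemma pvChain_succ (N m : Nat) :
    pvChain N (m + 1) = pvUpd (pvUpd (pvChain N m) m (m + 1) 1) (m + 1) m (-1) := by
  unfold pvChain
  rw [List.range_succ, List.foldl_append]
  rfl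

lemma pvChain_length (N m : Nat) : (pvChain N m).length = N := by
  induction m with
  | zero => simp [pvChain]
  | succ m ih => rw [pvChain_succ, pvUpd_length, pvUpd_length, ih]

lemma pvChain_row_length (N m p : Nat) (hp : p < N) :
    ((pvChain N m).getD p []).length = N := by
  induction m with
  | zero => simp [pvChain, List.getD, hp]
  | succ m ih => rw [pvChain_succ, pvUpd_row_length, pvUpd_row_length, ih]

lemma pvChain_get (N p q : Nat) (hp : p < N) (hq : q < N) : ∀ m : Nat, m + 1 ≤ N →
    pvGet (pvChain N m) p q =
      if q = p + 1 ∧ p < m then 1 else if p = q + 1 ∧ q < m then -1 else 0 := by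
  intro m
  induction m with
  | zero => intro _; simp [pvChain, pvGet, List.getD, hp, hq]
  | succ m ih =>
      intro hm
      have hm' : m + 1 ≤ N := by omega
      have h1 : m < (pvChain N m).length := by rw [pvChain_length]; omega
      have h2 : m + 1 < ((pvChain N m).getD m []).length := by
        rw [pvChain_row_length N m m (by omega)]; omega
      have h3 : m + 1 < (pvUpd (pvChain N m) m (m + 1) 1).length := by
        rw [pvUpd_length, pvChain_length]; omega
      have h4 : m < ((pvUpd (pvChain N m) m (m + 1) 1).getD (m + 1) []).length := by
        rw [pvUpd_row_length, pvChain_row_length N m (m + 1) (by omega)]; omega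
      rw [pvChain_succ, pvGet_upd _ _ _ _ _ _ h3 h4, pvGet_upd _ _ _ _ _ _ h1 h2, ih hm']
      split_ifs <;> omega

-- A's result written as pvChain plus the four trivalent-node updates
lemma pvA_closed (n : Int) (h : ¬ n < 4) :
    make_D_n_exchange_matrix n =
      pvUpd (pvUpd (pvUpd (pvUpd (pvChain n.toNat (n.toNat - 3))
        (n.toNat - 3) (n.toNat - 2) 1) (n.toNat - 2) (n.toNat - 3) (-1))
        (n.toNat - 3) (n.toNat - 1) 1) (n.toNat - 1) (n.toNat - 3) (-1) := by
  unfold make_D_n_exchange_matrix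
  rw [if_neg h]
  rfl

lemma pvGetElem_eq_pvGet (B : List (List Int)) (p q : Nat)
    (h1 : p < B.length) (h2 : q < B[p].length) : B[p][q] = pvGet B p q := by
  simp [pvGet, h1, h2]

-- ===== VERDICT (by name: the statement is the Claim_ definition above) =====
lemma pvRow_length (N i : Nat) : (pvRow N i).length = N := by
  unfold pvRow pvSucc pvPred
  split_ifs <;> simp

lemma pvGetD_replicate (N q : Nat) : (List.replicate N (0 : Int)).getD q 0 = 0 := by
  rcases Nat.lt_or_ge q N with h | h
  · simp [List.getD, h]
  · simp [List.getD, Nat.not_lt.mpr h]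

set_option maxHeartbeats 1000000 in
lemma pvRow_entry (N p q : Nat) (hN : 4 ≤ N) (hp : p < N) (hq : q < N) :
    (pvRow N p).getD q 0 =
      if p = N - 1 ∧ q = N - 3 then -1
      else if p = N - 3 ∧ q = N - 1 then 1
      else if p = N - 2 ∧ q = N - 3 then -1
      else if p = N - 3 ∧ q = N - 2 then 1
      else if q = p + 1 ∧ p < N - 3 then 1
      else if p = q + 1 ∧ q < N - 3 then -1 else 0 := by
  unfold pvRow pvSucc pvPred
  split_ifs <;>
    simp only [List.foldl_cons, List.foldl_nil, pvGetD_set,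
      List.length_set, List.length_replicate, pvGetD_replicate] <;>
    omega

theorem make_D_n_exchange_matrix_spec : Claim_equal_make_D_n_exchange_matrix := by
  intro n _ hpre
  unfold Spec_make_D_n_exchange_matrix
  have hn4 : ¬ n < 4 := not_lt.mpr hpre
  obtain ⟨N, hN4, rfl⟩ : ∃ N : Nat, 4 ≤ N ∧ n = (N : Int) :=
    ⟨n.toNat, by omega, by omega⟩
  have htN : ((N : Int)).toNat = N := by simp
  rw [pvA_closed _ hn4, make_D_n_exchange_matrix_alt, if_neg hn4, htN]
  -- lengths of the A side
  have hlen0 : (pvChain N (N - 3)).length = N := pvChain_length N (N - 3)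
  have hrow0 : ∀ p, p < N → ((pvChain N (N - 3)).getD p []).length = N :=
    fun p hp => pvChain_row_length N (N - 3) p hp
  have l0 : N - 3 < (pvChain N (N - 3)).length := by omega
  have r0 : N - 2 < ((pvChain N (N - 3)).getD (N - 3) []).length := by
    rw [hrow0 (N - 3) (by omega)]; omega
  have l1 : N - 2 < (pvUpd (pvChain N (N - 3)) (N - 3) (N - 2) 1).length := by
    rw [pvUpd_length]; omega
  have r1 : N - 3 < ((pvUpd (pvChain N (N - 3)) (N - 3) (N - 2) 1).getD (N - 2) []).length := by
    rw [pvUpd_row_length, hrow0 (N - 2) (by omega)]; omega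
  have l2 : N - 3 < (pvUpd (pvUpd (pvChain N (N - 3)) (N - 3) (N - 2) 1) (N - 2) (N - 3) (-1)).length := by
    rw [pvUpd_length, pvUpd_length]; omega
  have r2 : N - 1 < ((pvUpd (pvUpd (pvChain N (N - 3)) (N - 3) (N - 2) 1) (N - 2) (N - 3) (-1)).getD (N - 3) []).length := by
    rw [pvUpd_row_length, pvUpd_row_length, hrow0 (N - 3) (by omega)]; omega
  have l3 : N - 1 < (pvUpd (pvUpd (pvUpd (pvChain N (N - 3)) (N - 3) (N - 2) 1) (N - 2) (N - 3) (-1)) (N - 3) (N - 1) 1).length := by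
    rw [pvUpd_length, pvUpd_length, pvUpd_length]; omega
  have r3 : N - 3 < ((pvUpd (pvUpd (pvUpd (pvChain N (N - 3)) (N - 3) (N - 2) 1) (N - 2) (N - 3) (-1)) (N - 3) (N - 1) 1).getD (N - 1) []).length := by
    rw [pvUpd_row_length, pvUpd_row_length, pvUpd_row_length, hrow0 (N - 1) (by omega)]; omega
  apply List.ext_getElem
  · simp only [List.length_map, List.length_range]
    rw [pvUpd_length, pvUpd_length, pvUpd_length, pvUpd_length, hlen0]
  · intro p hp hp'
    have hpN : p < N := by simpa using hp'
    apply List.ext_getElem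
    · rw [List.getD_eq_getElem _ [] hp |>.symm]
      simp only [List.getElem_map, List.getElem_range]
      rw [pvUpd_row_length, pvUpd_row_length, pvUpd_row_length, pvUpd_row_length,
          hrow0 p hpN, pvRow_length]
    · intro q hq hq'
      have hqN : q < N := by simpa [pvRow_length] using hq'
      rw [pvGetElem_eq_pvGet _ p q hp hq]
      rw [pvGet_upd _ _ _ _ _ _ l3 r3, pvGet_upd _ _ _ _ _ _ l2 r2,
          pvGet_upd _ _ _ _ _ _ l1 r1, pvGet_upd _ _ _ _ _ _ l0 r0,
          pvChain_get N p q hpN hqN (N - 3) (by omega)]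
      have hqr : q < (pvRow N p).length := by rw [pvRow_length]; exact hqN
      simp only [List.getElem_map, List.getElem_range]
      rw [← List.getD_eq_getElem (pvRow N p) 0 hqr, pvRow_entry N p q hN4 hpN hqN]
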